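-- pv_equiv track=rewrite | github.com/LbzSteven/implet | utils/constants.py | create_1d_zigzag_array
-- ===== SOURCE A (Python) =====
-- def create_1d_zigzag_array(size):
--     zigzag_array = []
--     for i in range(size):
--         if i % 2 == 0:
--             zigzag_array.append(1)  # Increasing for even indices
--         else:
--             zigzag_array.append(0)  # Decreasing for odd indices
--     return zigzag_array
-- ===== SOURCE B (Python) =====
-- def create_1d_zigzag_array(size):
--     return ([1, 0] * (size // 2 + 1))[:size]
-- ===== Notes on version B (the rewrite author's own statement) =====
-- stated objective: idiomatic
-- what changed: Replaces the per-index loop with its modulo-parity branch by block replication: repeat the two-element unit enough times and slice the result to length.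
import Mathlib
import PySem

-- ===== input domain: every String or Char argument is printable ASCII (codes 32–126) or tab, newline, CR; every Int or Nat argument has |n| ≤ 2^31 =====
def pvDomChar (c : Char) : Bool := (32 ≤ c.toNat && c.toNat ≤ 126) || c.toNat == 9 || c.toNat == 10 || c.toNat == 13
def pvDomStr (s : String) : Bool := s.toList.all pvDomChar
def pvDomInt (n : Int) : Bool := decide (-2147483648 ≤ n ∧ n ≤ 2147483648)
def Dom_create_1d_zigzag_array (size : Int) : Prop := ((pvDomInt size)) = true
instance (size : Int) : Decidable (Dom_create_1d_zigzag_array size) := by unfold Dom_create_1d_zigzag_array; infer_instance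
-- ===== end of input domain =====

-- B builds the list by replicating the two-element unit and slicing to length instead of A's
-- per-index loop with a parity test (objective: idiomatic).

-- ===== PORT A =====
def create_1d_zigzag_array (size : Int) : List Int :=
  (PySem.List.pyRange 0 size 1).foldl
    (fun zigzag_array i =>
      if PySem.Int.mod i 2 = 0 then zigzag_array ++ [1] else zigzag_array ++ [0])
    []

-- ===== PORT B =====
def create_1d_zigzag_array_alt (size : Int) : List Int :=
  PySem.List.slice (List.flatten (List.replicate (PySem.Int.floordiv size 2 + 1).toNat [1, 0]))
    none (some size)

-- ===== PRECONDITION & SPEC =====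
def Spec_create_1d_zigzag_array (size : Int) (out : List Int) : Prop := out = create_1d_zigzag_array_alt size
instance (size : Int) (out : List Int) : Decidable (Spec_create_1d_zigzag_array size out) := by unfold Spec_create_1d_zigzag_array; infer_instance

-- ===== CLAIM (what is proved, stated in full; the proofs are below) =====
def Claim_equal_create_1d_zigzag_array : Prop := ∀ (size : Int), Dom_create_1d_zigzag_array size → Spec_create_1d_zigzag_array size (create_1d_zigzag_array size)

-- ===== LEMMAS AND PROOFS =====

/-- The alternating pattern of length `n`. -/
def pvPat (n : Nat) : List Int := (List.range n).map (fun k => if k % 2 = 0 then (1 : Int) else 0)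

lemma pvPat_two_add (n : Nat) : pvPat (2 + n) = 1 :: 0 :: pvPat n := by
  unfold pvPat
  rw [List.range_add]
  simp [List.map_map, Function.comp_def, Nat.add_mod_left, List.range_succ]

lemma pvFlatten_replicate (m : Nat) :
    List.flatten (List.replicate m [(1 : Int), 0]) = pvPat (2 * m) := by
  induction m with
  | zero => simp [pvPat]
  | succ m ih =>
    rw [List.replicate_succ, List.flatten_cons, ih, Nat.mul_succ, Nat.add_comm, pvPat_two_add]
    rfl

lemma pvFoldl_snoc (p : Int → Prop) [DecidablePred p] (l : List Int) (acc : List Int) :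
    l.foldl (fun a i => if p i then a ++ [(1 : Int)] else a ++ [0]) acc
      = acc ++ l.map (fun i => if p i then (1 : Int) else 0) := by
  induction l generalizing acc with
  | nil => simp
  | cons x xs ih => by_cases h : p x <;> simp [h, ih]

-- ===== VERDICT (by name: the statement is the Claim_ definition above) =====
theorem create_1d_zigzag_array_spec : Claim_equal_create_1d_zigzag_array := by
  intro size _
  unfold Spec_create_1d_zigzag_array create_1d_zigzag_array create_1d_zigzag_array_alt
  by_cases hpos : 0 < size
  · -- positive size
    have h2 : PySem.Int.floordiv size 2 = size / 2 :=
      PySem.Int.floordiv_eq_ediv_of_pos (by omega)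
    rw [h2, pvFlatten_replicate, PySem.List.slice_to _ (by omega : (0:Int) ≤ size),
        PySem.List.pyRange_one, pvFoldl_snoc (fun i => PySem.Int.mod i 2 = 0)]
    have hmod : ∀ k : Nat, PySem.Int.mod (0 + (k : Int)) 2 = (if k % 2 = 0 then (0:Int) else 1) := by
      intro k
      rw [PySem.Int.mod_eq_emod_of_pos (by omega)]
      omega
    have hle : size.toNat ≤ 2 * (size / 2 + 1).toNat := by omega
    unfold pvPat
    rw [List.map_map, ← List.map_take, List.take_range, Nat.min_eq_left hle]
    simp only [Int.sub_zero]
    apply List.map_congr_left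
    intro k _
    simp only [Function.comp_def, hmod]
    by_cases h : k % 2 = 0 <;> simp [h]
  · -- size ≤ 0 : A loops over the empty range; B replicates ≤ 0 blocks or slices to ≤ 0
    rw [PySem.List.pyRange_one_eq_nil (by omega)]
    simp only [List.foldl_nil]
    by_cases hz : size = 0
    · subst hz; decide
    · have : (PySem.Int.floordiv size 2 + 1).toNat = 0 := by
        have := PySem.Int.floordiv_lt_iff_lt_mul (a := size) (b := 2) (q := 0) (by omega)
        omega
      rw [this]
      simp [PySem.List.slice]
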